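-- pv_equiv track=rewrite | github.com/vdslab/bebebe | analysis/rhyme.py | make_score
-- ===== SOURCE A (Python) =====
-- def make_score(word_a, word_b):
--     score = 0
--     if len(word_a) > len(word_b):
--         word_len = len(word_b)
--         for i in range(word_len):
--             for j in range(word_len + 1):
--                 if word_b[i:j] in word_a:
--                     score += len(word_b[i:j])
--     else:
--         word_len = len(word_a)
--         for i in range(word_len):
--             for j in range(word_len + 1):
--                 if word_a[i:j] in word_b:
--                     score += len(word_a[i:j])
--     return score
-- ===== SOURCE B (Python) =====
-- def make_score(word_a, word_b):
--     # Per start index, greedily extend the longest prefix still found in the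
--     # other word, then add L*(L+1)//2 in closed form (prefix-closedness of
--     # substring containment makes the inner scan of A redundant).
--     w, o = (word_b, word_a) if len(word_a) > len(word_b) else (word_a, word_b)
--     score = 0
--     n = len(w)
--     for i in range(n):
--         L = 0
--         while i + L < n and w[i:i + L + 1] in o:
--             L += 1
--         score += L * (L + 1) // 2
--     return score
-- ===== Notes on version B (the rewrite author's own statement) =====
-- stated objective: faster
-- what changed: Instead of testing every slice w[i:j] of the shorter word against the longer word, B extends greedily from each start index to the longest matching prefix L (substring containment is prefix-closed) and adds L*(L+1)//2 in closed form, dropping the inner j-scan.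
import Mathlib
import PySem

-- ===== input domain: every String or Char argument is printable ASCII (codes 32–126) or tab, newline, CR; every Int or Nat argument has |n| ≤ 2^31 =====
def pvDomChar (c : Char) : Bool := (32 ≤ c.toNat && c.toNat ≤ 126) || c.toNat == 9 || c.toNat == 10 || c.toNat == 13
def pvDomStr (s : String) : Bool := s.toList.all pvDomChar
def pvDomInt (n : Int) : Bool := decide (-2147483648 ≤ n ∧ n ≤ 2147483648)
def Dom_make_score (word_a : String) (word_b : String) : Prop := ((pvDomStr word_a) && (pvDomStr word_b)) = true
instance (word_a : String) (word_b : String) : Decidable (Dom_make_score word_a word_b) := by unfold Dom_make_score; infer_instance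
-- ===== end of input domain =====

-- B replaces A's scan over every slice w[i:j] by a greedy longest-match extension per
-- start index plus the closed form L*(L+1)//2 (objective: faster).

-- ===== PORT A =====
-- the double loop A runs on (shorter word w, longer word o):
-- for i in range(len(w)): for j in range(len(w)+1): if w[i:j] in o: score += len(w[i:j])
def pvLoopA (w o : List Char) : Int :=
  (PySem.List.pyRange 0 (w.length : Int) 1).foldl (fun score i =>
    (PySem.List.pyRange 0 ((w.length : Int) + 1) 1).foldl (fun score j =>
      if PySem.Chars.isIn (PySem.List.slice w (some i) (some j)) o
      then score + ((PySem.List.slice w (some i) (some j)).length : Int)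
      else score) score) 0

def make_score (word_a : String) (word_b : String) : Int :=
  if word_a.toList.length > word_b.toList.length
  then pvLoopA word_b.toList word_a.toList
  else pvLoopA word_a.toList word_b.toList

-- ===== PORT B =====
-- the while loop of B: while i + L < len(w) and w[i:i+L+1] in o: L += 1
-- (i comes from range(len(w)), so i ≥ 0 and the slice w[i:i+L+1] is
-- (w.drop i).take (L+1), exactly PySem.List.slice_natCast_add)
def pvExtend (w o : List Char) (i L : Nat) : Nat :=
  if h : i + L < w.length ∧ PySem.Chars.isIn ((w.drop i).take (L + 1)) o = true then
    pvExtend w o i (L + 1)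
  else L
termination_by w.length - (i + L)
decreasing_by omega

def pvLoopB (w o : List Char) : Int :=
  (PySem.List.pyRange 0 (w.length : Int) 1).foldl (fun score i =>
    score + PySem.Int.floordiv ((pvExtend w o i.toNat 0 : Int) * ((pvExtend w o i.toNat 0 : Int) + 1)) 2) 0

def make_score_alt (word_a : String) (word_b : String) : Int :=
  if word_a.toList.length > word_b.toList.length
  then pvLoopB word_b.toList word_a.toList
  else pvLoopB word_a.toList word_b.toList

-- ===== PRECONDITION & SPEC =====
def Spec_make_score (word_a : String) (word_b : String) (out : Int) : Prop := out = make_score_alt word_a word_b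
instance (word_a : String) (word_b : String) (out : Int) : Decidable (Spec_make_score word_a word_b out) := by unfold Spec_make_score; infer_instance

-- ===== CLAIM (what is proved, stated in full; the proofs are below) =====
def Claim_equal_make_score : Prop := ∀ (word_a : String) (word_b : String), Dom_make_score word_a word_b → Spec_make_score word_a word_b (make_score word_a word_b)

-- ===== LEMMAS AND PROOFS =====

-- containment of a take is downward closed (a prefix of an infix is an infix)
lemma pv_take_mono (w o : List Char) (k : Nat) {l m : Nat} (hml : m ≤ l)
    (h : PySem.Chars.isIn ((w.drop k).take l) o = true) :
    PySem.Chars.isIn ((w.drop k).take m) o = true := by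
  rw [PySem.Chars.isIn_iff_infix] at h ⊢
  have h1 : (w.drop k).take m <+: (w.drop k).take l := by
    rw [show (w.drop k).take m = ((w.drop k).take l).take m by
      rw [List.take_take, Nat.min_eq_left hml]]
    exact List.take_prefix _ _
  exact h1.isInfix.trans h

-- specification of the greedy extension loop
lemma pv_extend_spec (w o : List Char) (k : Nat) : ∀ L0,
    k + L0 ≤ w.length → PySem.Chars.isIn ((w.drop k).take L0) o = true →
    L0 ≤ pvExtend w o k L0 ∧ k + pvExtend w o k L0 ≤ w.length ∧
    PySem.Chars.isIn ((w.drop k).take (pvExtend w o k L0)) o = true ∧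
    (k + pvExtend w o k L0 < w.length →
      PySem.Chars.isIn ((w.drop k).take (pvExtend w o k L0 + 1)) o = false) := by
  intro L0 h1 h2
  fun_induction pvExtend w o k L0 with
  | case1 L h ih =>
      have := ih (by omega) h.2
      exact ⟨by omega, this.2.1, this.2.2.1, this.2.2.2⟩
  | case2 L h =>
      refine ⟨le_refl _, h1, h2, fun hlt => ?_⟩
      cases hc : PySem.Chars.isIn ((w.drop k).take (L + 1)) o
      · rfl
      · exact absurd ⟨hlt, hc⟩ h

-- the lengths whose take is contained in o are exactly those up to the greedy maximum
lemma pv_iff (w o : List Char) (k : Nat) (hk : k ≤ w.length) (l : Nat) (hl : l ≤ w.length - k) :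
    (PySem.Chars.isIn ((w.drop k).take l) o = true ↔ l ≤ pvExtend w o k 0) := by
  have h0 : PySem.Chars.isIn ((w.drop k).take 0) o = true := by
    simp [PySem.Chars.isIn_nil]
  obtain ⟨-, hle, hP, hmax⟩ := pv_extend_spec w o k 0 (by omega) h0
  constructor
  · intro hPl
    by_contra hc
    have hlt : k + pvExtend w o k 0 < w.length := by omega
    have := pv_take_mono w o k (show pvExtend w o k 0 + 1 ≤ l by omega) hPl
    rw [hmax hlt] at this; exact absurd this (by simp)
  · intro hle'
    exact pv_take_mono w o k hle' hP

-- Gauss sum of the clipped contributions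
lemma pv_clip_zero (k : Nat) :
    ((List.range (k + 1)).map (fun j => if j - k ≤ 0 then ((j - k : Nat) : Int) else 0)).sum = 0 := by
  apply List.sum_eq_zero
  intro x hx
  simp only [List.mem_map, List.mem_range] at hx
  obtain ⟨j, hj, rfl⟩ := hx
  have : j - k = 0 := by omega
  simp [this]

lemma pv_clip_head (k L : Nat) :
    ((List.range (k + L + 1)).map (fun j => if j - k ≤ L then ((j - k : Nat) : Int) else 0)).sum
      = ((L * (L + 1) / 2 : Nat) : Int) := by
  induction L with
  | zero => simpa using pv_clip_zero k
  | succ L ih =>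
      rw [show k + (L+1) + 1 = (k + L + 1) + 1 by ring, List.range_succ, List.map_append,
        List.sum_append]
      have h1 : ((List.range (k + L + 1)).map (fun j => if j - k ≤ L + 1 then ((j - k : Nat) : Int) else 0))
          = ((List.range (k + L + 1)).map (fun j => if j - k ≤ L then ((j - k : Nat) : Int) else 0)) := by
        apply List.map_congr_left
        intro j hj
        rw [List.mem_range] at hj
        rw [if_pos (show j - k ≤ L + 1 by omega), if_pos (show j - k ≤ L by omega)]
      rw [h1, ih]
      have h2 : (k + L + 1) - k = L + 1 := by omega
      simp only [List.map_cons, List.map_nil, List.sum_cons, List.sum_nil, h2]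
      have : L + 1 ≤ L + 1 := le_refl _
      rw [if_pos this]
      push_cast [Nat.succ_mul_succ]
      omega

lemma pv_clip_sum (m k L : Nat) (h : k + L < m) :
    ((List.range m).map (fun j => if j - k ≤ L then ((j - k : Nat) : Int) else 0)).sum
      = ((L * (L + 1) / 2 : Nat) : Int) := by
  induction m with
  | zero => omega
  | succ m ih =>
      rcases Nat.lt_or_ge (k + L) m with hm | hm
      · rw [List.range_succ, List.map_append, List.sum_append, ih hm]
        have hng : ¬ (m - k ≤ L) := by omega
        simp only [List.map_cons, List.map_nil, List.sum_cons, List.sum_nil, if_neg hng, add_zero]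
      · have : m = k + L := by omega
        subst this
        exact pv_clip_head k L

-- a guarded accumulation is the start value plus a sum
lemma pv_foldl_guard {α : Type} (xs : List α) (p : α → Prop) [DecidablePred p] (v : α → Int) :
    ∀ s : Int, xs.foldl (fun s x => if p x then s + v x else s) s
      = s + (xs.map (fun x => if p x then v x else 0)).sum := by
  induction xs with
  | nil => simp
  | cons x xs ih =>
      intro s
      simp only [List.foldl_cons, List.map_cons, List.sum_cons, ih]
      split <;> ring

-- A's inner loop over j computes the closed form for start index k
lemma pv_inner (w o : List Char) (k : Nat) (hk : k < w.length) (s : Int) :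
    (PySem.List.pyRange 0 ((w.length : Int) + 1) 1).foldl (fun score j =>
      if PySem.Chars.isIn (PySem.List.slice w (some (k : Int)) (some j)) o
      then score + ((PySem.List.slice w (some (k : Int)) (some j)).length : Int)
      else score) s
    = s + ((pvExtend w o k 0 * (pvExtend w o k 0 + 1) / 2 : Nat) : Int) := by
  have hcast : ((w.length : Int) + 1) = ((w.length + 1 : Nat) : Int) := by push_cast; ring
  rw [hcast, PySem.List.pyRange_zero_nat, List.foldl_map]
  simp only [PySem.List.slice_natCast]
  rw [pv_foldl_guard]
  congr 1
  have hcongr : (List.range (w.length + 1)).map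
      (fun j => if PySem.Chars.isIn ((w.drop k).take (j - k)) o = true
                then (((w.drop k).take (j - k)).length : Int) else 0)
      = (List.range (w.length + 1)).map
      (fun j => if j - k ≤ pvExtend w o k 0 then ((j - k : Nat) : Int) else 0) := by
    apply List.map_congr_left
    intro j hj
    rw [List.mem_range] at hj
    have hlen : ((w.drop k).take (j - k)).length = j - k := by
      simp [List.length_take, List.length_drop]; omega
    rw [hlen, if_congr (pv_iff w o k (by omega) (j - k) (by omega)) rfl rfl]
  rw [hcongr]
  obtain ⟨-, hle, -, -⟩ := pv_extend_spec w o k 0 (by omega) (by simp [PySem.Chars.isIn_nil])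
  exact pv_clip_sum (w.length + 1) k (pvExtend w o k 0) (by omega)

lemma pv_loop_eq (w o : List Char) : pvLoopA w o = pvLoopB w o := by
  unfold pvLoopA pvLoopB
  rw [PySem.List.pyRange_zero_nat, List.foldl_map, List.foldl_map]
  apply PySem.List.foldl_congr_mem
  intro s k hk
  rw [List.mem_range] at hk
  rw [pv_inner w o k hk s]
  rw [Int.toNat_natCast k]
  congr 1
  have h2 : ((pvExtend w o k 0 : Nat) : Int) * ((pvExtend w o k 0 : Nat) + 1)
      = ((pvExtend w o k 0 * (pvExtend w o k 0 + 1) : Nat) : Int) := by push_cast; ring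
  rw [h2]
  exact_mod_cast (PySem.Int.floordiv_natCast (pvExtend w o k 0 * (pvExtend w o k 0 + 1)) 2).symm

-- ===== VERDICT (by name: the statement is the Claim_ definition above) =====
theorem make_score_spec : Claim_equal_make_score := by
  intro a b _
  unfold Spec_make_score make_score make_score_alt
  split <;> exact pv_loop_eq _ _
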